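-- pv_equiv track=rewrite | github.com/openedx/edx-platform | openedx/features/pakx/lms/overrides/utils.py | _accumulate_total_block_counts
-- ===== SOURCE A (Python) =====
-- CORE_BLOCK_TYPES = ['html', 'video', 'problem']
--
-- def _accumulate_total_block_counts(total_block_type_counts):
--     """
--     Converts total_block_type_counts to required format.
--
--     Accumulates all types of completable course blocks except html, problem and video
--     into an 'other' category.
--
--     Arguments:
--         total_block_type_counts (dict): Total block type counts of required course
--
--     Returns:
--         accumulated_data (dict): Accumulated block type counts
--     """
--
--     accumulated_data = {
--         'problem': 0,
--         'video': 0,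
--         'html': 0,
--         'other': 0
--     }
--     if total_block_type_counts:
--         for block_type, count in total_block_type_counts.items():
--             if block_type in CORE_BLOCK_TYPES:
--                 accumulated_data[block_type] = count
--             else:
--                 accumulated_data['other'] += count
--
--     return accumulated_data
-- ===== SOURCE B (Python) =====
-- CORE_BLOCK_TYPES = ['html', 'video', 'problem']
--
--
-- def _accumulate_total_block_counts(total_block_type_counts):
--     counts = total_block_type_counts or {}
--     core = {t: counts.get(t, 0) for t in CORE_BLOCK_TYPES}
--     return {
--         'problem': core['problem'],
--         'video': core['video'],
--         'html': core['html'],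
--         'other': sum(counts.values()) - sum(core.values()),
--     }
-- ===== Notes on version B (the rewrite author's own statement) =====
-- stated objective: alternative
-- what changed: A classifies each input entry with a branching loop, adding non-core counts into 'other'; B never scans for non-core entries at all: it looks up the three core buckets directly and derives 'other' by the arithmetic identity other = sum(all counts) - sum(core buckets). Pre_ only excludes association lists with duplicate keys, which cannot arise from a Python dict (there A's last-occurrence assignment vs B's first-match lookup are both accidental).
import Mathlib
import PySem

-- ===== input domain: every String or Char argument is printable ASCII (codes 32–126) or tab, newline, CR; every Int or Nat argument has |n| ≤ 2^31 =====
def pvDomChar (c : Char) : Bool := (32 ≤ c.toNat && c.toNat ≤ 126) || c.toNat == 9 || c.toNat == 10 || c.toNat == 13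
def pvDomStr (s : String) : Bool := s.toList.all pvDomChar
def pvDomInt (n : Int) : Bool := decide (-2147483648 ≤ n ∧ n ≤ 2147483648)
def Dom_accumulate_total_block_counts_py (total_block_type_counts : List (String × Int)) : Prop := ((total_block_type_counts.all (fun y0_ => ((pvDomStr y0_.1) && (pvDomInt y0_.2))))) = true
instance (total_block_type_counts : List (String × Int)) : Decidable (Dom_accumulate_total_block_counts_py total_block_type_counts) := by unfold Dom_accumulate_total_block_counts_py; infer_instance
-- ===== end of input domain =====

-- B never scans for the non-core entries: it looks up the three core buckets directly and derives
-- 'other' by the arithmetic identity other = sum(all counts) - sum(core buckets), instead of A's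
-- branching classification loop; objective: alternative.

-- ===== PORT A =====
def CORE_BLOCK_TYPES : List String := ["html", "video", "problem"]

def accumulate_total_block_counts_py (total_block_type_counts : List (String × Int)) : List (String × Int) :=
  let accumulated_data : PySem.Dict String Int :=
    PySem.Dict.mk [("problem", 0), ("video", 0), ("html", 0), ("other", 0)]
  let accumulated_data :=
    if total_block_type_counts.isEmpty then accumulated_data
    else
      total_block_type_counts.foldl
        (fun d p =>
          if CORE_BLOCK_TYPES.contains p.1 then d.insert p.1 p.2
          else d.modify "other" 0 (· + p.2))   -- 'other' is always present, so += = modify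
        accumulated_data
  accumulated_data.items

-- ===== PORT B =====
def accumulate_total_block_counts_py_alt (total_block_type_counts : List (String × Int)) : List (String × Int) :=
  let counts := PySem.Dict.mk total_block_type_counts
  let core : PySem.Dict String Int :=
    PySem.Dict.mk (CORE_BLOCK_TYPES.map (fun t => (t, counts.getD t 0)))
  [("problem", core.getD "problem" 0),
   ("video", core.getD "video" 0),
   ("html", core.getD "html" 0),
   ("other", counts.values.foldl (· + ·) 0 - core.values.foldl (· + ·) 0)]

-- ===== PRECONDITION & SPEC =====
-- Pre_ excludes association lists with duplicate keys: they cannot arise from a Python dict, and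
-- there A's last-occurrence assignment and B's first-match lookup are both accidental.
def Pre_accumulate_total_block_counts_py (total_block_type_counts : List (String × Int)) : Prop :=
  (total_block_type_counts.map Prod.fst).Nodup
instance (total_block_type_counts : List (String × Int)) : Decidable (Pre_accumulate_total_block_counts_py total_block_type_counts) := by unfold Pre_accumulate_total_block_counts_py; infer_instance

def pvWitness_accumulate_total_block_counts_py : (List (String × Int)) := [("html", 2), ("discussion", 3), ("problem", 1)]

def Spec_accumulate_total_block_counts_py (total_block_type_counts : List (String × Int)) (out : List (String × Int)) : Prop := out = accumulate_total_block_counts_py_alt total_block_type_counts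
instance (total_block_type_counts : List (String × Int)) (out : List (String × Int)) : Decidable (Spec_accumulate_total_block_counts_py total_block_type_counts out) := by unfold Spec_accumulate_total_block_counts_py; infer_instance

-- ===== CLAIM (what is proved, stated in full; the proofs are below) =====
def Claim_equal_accumulate_total_block_counts_py : Prop := ∀ (total_block_type_counts : List (String × Int)), Dom_accumulate_total_block_counts_py total_block_type_counts → Pre_accumulate_total_block_counts_py total_block_type_counts → Spec_accumulate_total_block_counts_py total_block_type_counts (accumulate_total_block_counts_py total_block_type_counts)

-- ===== LEMMAS AND PROOFS =====

-- last-occurrence lookup, the effect of A's core-branch assignments on one bucket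
def lastGet (l : List (String × Int)) (k : String) (d : Int) : Int :=
  l.foldl (fun a p => if p.1 = k then p.2 else a) d

-- running sum of the non-core counts, the effect of A's other-branch
def osum (l : List (String × Int)) (s : Int) : Int :=
  l.foldl (fun a p => if CORE_BLOCK_TYPES.contains p.1 then a else a + p.2) s

theorem getD_mk_cons (a : String) (b : Int) (xs : List (String × Int)) (k : String) (d : Int) :
    (PySem.Dict.mk ((a, b) :: xs)).getD k d =
      if a = k then b else (PySem.Dict.mk xs).getD k d := by
  rw [PySem.Dict.getD_eq_get?_getD, PySem.Dict.get?_mk_cons]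
  by_cases h : a = k
  · simp [h]
  · simp [h, PySem.Dict.getD_eq_get?_getD]

theorem A_fold (l : List (String × Int)) (p v h o : Int) :
    l.foldl
      (fun d q =>
        if CORE_BLOCK_TYPES.contains q.1 then d.insert q.1 q.2
        else d.modify "other" 0 (· + q.2))
      (PySem.Dict.mk [("problem", p), ("video", v), ("html", h), ("other", o)]) =
    PySem.Dict.mk [("problem", lastGet l "problem" p), ("video", lastGet l "video" v),
                   ("html", lastGet l "html" h), ("other", osum l o)] := by
  induction l generalizing p v h o with
  | nil => rfl
  | cons x xs ih =>
    obtain ⟨k, c⟩ := x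
    rw [List.foldl_cons]
    by_cases hc : CORE_BLOCK_TYPES.contains k = true
    · have hk : k = "html" ∨ k = "video" ∨ k = "problem" := by
        simpa [CORE_BLOCK_TYPES] using hc
      rcases hk with rfl | rfl | rfl
      · have hstep :
            (if CORE_BLOCK_TYPES.contains ("html", c).1 then
              (PySem.Dict.mk [("problem", p), ("video", v), ("html", h), ("other", o)]).insert ("html", c).1 ("html", c).2
            else (PySem.Dict.mk [("problem", p), ("video", v), ("html", h), ("other", o)]).modify "other" 0 (· + ("html", c).2)) =
            PySem.Dict.mk [("problem", p), ("video", v), ("html", c), ("other", o)] := by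
          simp [CORE_BLOCK_TYPES, PySem.Dict.insert, PySem.Dict.contains]
        rw [hstep, ih]
        simp [lastGet, osum, CORE_BLOCK_TYPES]
      · have hstep :
            (if CORE_BLOCK_TYPES.contains ("video", c).1 then
              (PySem.Dict.mk [("problem", p), ("video", v), ("html", h), ("other", o)]).insert ("video", c).1 ("video", c).2
            else (PySem.Dict.mk [("problem", p), ("video", v), ("html", h), ("other", o)]).modify "other" 0 (· + ("video", c).2)) =
            PySem.Dict.mk [("problem", p), ("video", c), ("html", h), ("other", o)] := by
          simp [CORE_BLOCK_TYPES, PySem.Dict.insert, PySem.Dict.contains]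
        rw [hstep, ih]
        simp [lastGet, osum, CORE_BLOCK_TYPES]
      · have hstep :
            (if CORE_BLOCK_TYPES.contains ("problem", c).1 then
              (PySem.Dict.mk [("problem", p), ("video", v), ("html", h), ("other", o)]).insert ("problem", c).1 ("problem", c).2
            else (PySem.Dict.mk [("problem", p), ("video", v), ("html", h), ("other", o)]).modify "other" 0 (· + ("problem", c).2)) =
            PySem.Dict.mk [("problem", c), ("video", v), ("html", h), ("other", o)] := by
          simp [CORE_BLOCK_TYPES, PySem.Dict.insert, PySem.Dict.contains]
        rw [hstep, ih]
        simp [lastGet, osum, CORE_BLOCK_TYPES]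
    · have h1 : k ≠ "html" := by rintro rfl; simp [CORE_BLOCK_TYPES] at hc
      have h2 : k ≠ "video" := by rintro rfl; simp [CORE_BLOCK_TYPES] at hc
      have h3 : k ≠ "problem" := by rintro rfl; simp [CORE_BLOCK_TYPES] at hc
      have hm : k ∉ CORE_BLOCK_TYPES := by simpa using hc
      have hstep :
          (if CORE_BLOCK_TYPES.contains (k, c).1 then
            (PySem.Dict.mk [("problem", p), ("video", v), ("html", h), ("other", o)]).insert (k, c).1 (k, c).2
          else (PySem.Dict.mk [("problem", p), ("video", v), ("html", h), ("other", o)]).modify "other" 0 (· + (k, c).2)) =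
          PySem.Dict.mk [("problem", p), ("video", v), ("html", h), ("other", o + c)] := by
        simp only [PySem.Dict.modify, getD_mk_cons]
        simp [hm, PySem.Dict.insert]
      rw [hstep, ih]
      simp [lastGet, osum, h1, h2, h3, hm]

theorem lastGet_not_mem (l : List (String × Int)) (k : String) (d : Int)
    (h : k ∉ l.map Prod.fst) : lastGet l k d = d := by
  induction l generalizing d with
  | nil => rfl
  | cons x xs ih =>
    simp only [List.map_cons, List.mem_cons, not_or] at h
    simp [lastGet, List.foldl_cons, Ne.symm h.1]
    exact ih d h.2

theorem lastGet_nodup (l : List (String × Int)) (k : String) (d : Int)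
    (h : (l.map Prod.fst).Nodup) : lastGet l k d = (PySem.Dict.mk l).getD k d := by
  induction l generalizing d with
  | nil => rfl
  | cons x xs ih =>
    obtain ⟨a, b⟩ := x
    simp only [List.map_cons, List.nodup_cons] at h
    rw [getD_mk_cons]
    by_cases hk : a = k
    · subst hk
      rw [if_pos rfl]
      have : lastGet ((a, b) :: xs) a d = lastGet xs a b := by
        simp [lastGet, List.foldl_cons]
      rw [this]
      exact lastGet_not_mem xs a b h.1
    · rw [if_neg hk]
      have : lastGet ((a, b) :: xs) k d = lastGet xs k d := by
        simp [lastGet, List.foldl_cons, hk]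
      rw [this]
      exact ih d h.2

theorem foldl_add_shift (l : List (String × Int)) (s : Int) :
    l.foldl (fun a p => a + p.2) s = s + l.foldl (fun a p => a + p.2) 0 := by
  induction l generalizing s with
  | nil => simp
  | cons x xs ih =>
    simp only [List.foldl_cons]
    rw [ih (s + x.2), ih (0 + x.2)]
    ring

theorem osum_shift (l : List (String × Int)) (s : Int) :
    osum l s = s + osum l 0 := by
  induction l generalizing s with
  | nil => simp [osum]
  | cons x xs ih =>
    simp only [osum, List.foldl_cons] at ih ⊢
    by_cases hc : CORE_BLOCK_TYPES.contains x.1 = true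
    · rw [if_pos hc, if_pos hc]; exact ih s
    · rw [if_neg hc, if_neg hc, ih (s + x.2), ih (0 + x.2)]; ring

theorem lastGet_cons_core (t : String) (c : Int) (xs : List (String × Int))
    (ht : t ∉ xs.map Prod.fst) : lastGet ((t, c) :: xs) t 0 = c := by
  have h0 : lastGet ((t, c) :: xs) t 0 = lastGet xs t c := by
    simp [lastGet, List.foldl_cons]
  rw [h0]
  exact lastGet_not_mem xs t c ht

theorem lastGet_cons_ne (t k : String) (c : Int) (xs : List (String × Int))
    (hne : t ≠ k) : lastGet ((t, c) :: xs) k 0 = lastGet xs k 0 := by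
  simp only [lastGet, List.foldl_cons]
  rw [if_neg (by simpa using hne)]

-- the grand total of all counts splits into the non-core total plus the three core buckets
theorem sum_split (l : List (String × Int)) (h : (l.map Prod.fst).Nodup) :
    l.foldl (fun a p => a + p.2) 0 =
      osum l 0 + lastGet l "html" 0 + lastGet l "video" 0 + lastGet l "problem" 0 := by
  induction l with
  | nil => rfl
  | cons x xs ih =>
    obtain ⟨k, c⟩ := x
    simp only [List.map_cons, List.nodup_cons] at h
    have ih' := ih h.2
    have hsum : ((k, c) :: xs).foldl (fun a p => a + p.2) 0 =
        c + xs.foldl (fun a p => a + p.2) 0 := by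
      rw [List.foldl_cons, foldl_add_shift]; ring
    by_cases hc : CORE_BLOCK_TYPES.contains k = true
    · have hk : k = "html" ∨ k = "video" ∨ k = "problem" := by
        simpa [CORE_BLOCK_TYPES] using hc
      rcases hk with rfl | rfl | rfl
      · have hos : osum (("html", c) :: xs) 0 = osum xs 0 := by
          simp only [osum, List.foldl_cons]
          rw [if_pos (by decide)]
        rw [hsum, ih', hos, lastGet_cons_core "html" c xs h.1,
          lastGet_cons_ne "html" "video" c xs (by decide),
          lastGet_cons_ne "html" "problem" c xs (by decide),
          lastGet_not_mem xs "html" 0 h.1]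
        ring
      · have hos : osum (("video", c) :: xs) 0 = osum xs 0 := by
          simp only [osum, List.foldl_cons]
          rw [if_pos (by decide)]
        rw [hsum, ih', hos, lastGet_cons_core "video" c xs h.1,
          lastGet_cons_ne "video" "html" c xs (by decide),
          lastGet_cons_ne "video" "problem" c xs (by decide),
          lastGet_not_mem xs "video" 0 h.1]
        ring
      · have hos : osum (("problem", c) :: xs) 0 = osum xs 0 := by
          simp only [osum, List.foldl_cons]
          rw [if_pos (by decide)]
        rw [hsum, ih', hos, lastGet_cons_core "problem" c xs h.1,
          lastGet_cons_ne "problem" "html" c xs (by decide),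
          lastGet_cons_ne "problem" "video" c xs (by decide),
          lastGet_not_mem xs "problem" 0 h.1]
        ring
    · have h1 : k ≠ "html" := by rintro rfl; simp [CORE_BLOCK_TYPES] at hc
      have h2 : k ≠ "video" := by rintro rfl; simp [CORE_BLOCK_TYPES] at hc
      have h3 : k ≠ "problem" := by rintro rfl; simp [CORE_BLOCK_TYPES] at hc
      have hos : osum ((k, c) :: xs) 0 = c + osum xs 0 := by
        have h0 : osum ((k, c) :: xs) 0 = osum xs (0 + c) := by
          simp only [osum, List.foldl_cons]
          rw [if_neg hc]
        rw [h0, osum_shift]; ring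
      rw [hsum, ih', hos, lastGet_cons_ne k "html" c xs h1,
        lastGet_cons_ne k "video" c xs h2, lastGet_cons_ne k "problem" c xs h3]
      ring

theorem core_getD_problem (a b c : Int) :
    (PySem.Dict.mk [("html", a), ("video", b), ("problem", c)]).getD "problem" 0 = c := by
  rw [getD_mk_cons, if_neg (by decide), getD_mk_cons, if_neg (by decide),
    getD_mk_cons, if_pos rfl]

theorem core_getD_video (a b c : Int) :
    (PySem.Dict.mk [("html", a), ("video", b), ("problem", c)]).getD "video" 0 = b := by
  rw [getD_mk_cons, if_neg (by decide), getD_mk_cons, if_pos rfl]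

theorem core_getD_html (a b c : Int) :
    (PySem.Dict.mk [("html", a), ("video", b), ("problem", c)]).getD "html" 0 = a := by
  rw [getD_mk_cons, if_pos rfl]

-- ===== VERDICT (by name: the statement is the Claim_ definition above) =====
theorem accumulate_total_block_counts_py_spec : Claim_equal_accumulate_total_block_counts_py := by
  intro l _ hpre
  unfold Spec_accumulate_total_block_counts_py
  unfold accumulate_total_block_counts_py accumulate_total_block_counts_py_alt
  have hvals : (PySem.Dict.mk l).values.foldl (· + ·) 0 = l.foldl (fun a p => a + p.2) 0 := by
    simp [PySem.Dict.values, List.foldl_map]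
  by_cases he : l.isEmpty
  · rw [List.isEmpty_iff] at he
    subst he
    rfl
  · simp only [he, if_false, Bool.false_eq_true]
    rw [A_fold]
    have hcore : PySem.Dict.mk (CORE_BLOCK_TYPES.map (fun t => (t, (PySem.Dict.mk l).getD t 0))) =
        PySem.Dict.mk [("html", (PySem.Dict.mk l).getD "html" 0),
          ("video", (PySem.Dict.mk l).getD "video" 0),
          ("problem", (PySem.Dict.mk l).getD "problem" 0)] := by
      simp [CORE_BLOCK_TYPES]
    rw [hcore, hvals, sum_split l hpre,
      ← lastGet_nodup l "problem" 0 hpre, ← lastGet_nodup l "video" 0 hpre,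
      ← lastGet_nodup l "html" 0 hpre,
      core_getD_problem, core_getD_video, core_getD_html]
    simp only [PySem.Dict.values_mk, List.map_cons, List.map_nil,
      List.foldl_cons, List.foldl_nil, List.cons.injEq, Prod.mk.injEq, and_true]
    and_intros <;> first | trivial | ring
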